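-- pv_equiv track=rewrite | github.com/kancherlaabyudhay/radar-simulator | src/detect.py | group_close_segments
-- ===== SOURCE A (Python) =====
-- def group_close_segments(segments, gap_thresh):
--     if not segments:
--         return []
--     grouped = []
--     cur_start, cur_end = segments[0]
--     for s, e in segments[1:]:
--         if s - cur_end <= gap_thresh:
--             cur_end = e
--         else:
--             grouped.append((cur_start, cur_end))
--             cur_start, cur_end = s, e
--     grouped.append((cur_start, cur_end))
--     return grouped
-- ===== SOURCE B (Python) =====
-- def group_close_segments(segments, gap_thresh):
--     # Right-to-left pass: build the grouped list back-to-front, merging the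
--     # current segment into the most recently built group when the gap is small.
--     out = []
--     for s, e in reversed(segments):
--         if out and out[-1][0] - e <= gap_thresh:
--             out[-1] = (s, out[-1][1])
--         else:
--             out.append((s, e))
--     out.reverse()
--     return out
-- ===== Notes on version B (the rewrite author's own statement) =====
-- stated objective: alternative
-- what changed: B traverses the segments right-to-left, building the grouped list back-to-front and merging each segment into the most recently emitted group, instead of A's left-to-right loop carrying a cur_start/cur_end accumulator with a trailing flush append.
import Mathlib
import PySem

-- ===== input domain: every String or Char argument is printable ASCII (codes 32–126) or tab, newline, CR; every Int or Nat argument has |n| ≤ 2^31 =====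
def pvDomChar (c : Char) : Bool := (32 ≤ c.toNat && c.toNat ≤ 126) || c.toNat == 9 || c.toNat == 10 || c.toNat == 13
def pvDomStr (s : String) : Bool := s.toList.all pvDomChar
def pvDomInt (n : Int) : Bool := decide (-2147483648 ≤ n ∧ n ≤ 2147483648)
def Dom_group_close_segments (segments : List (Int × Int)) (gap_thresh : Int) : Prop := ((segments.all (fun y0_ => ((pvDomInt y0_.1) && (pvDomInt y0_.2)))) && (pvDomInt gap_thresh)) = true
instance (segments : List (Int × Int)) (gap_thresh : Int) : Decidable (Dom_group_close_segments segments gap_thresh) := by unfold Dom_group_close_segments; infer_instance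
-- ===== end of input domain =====

-- B builds the grouped list back-to-front with a right-to-left pass instead of A's
-- left-to-right cur_start/cur_end accumulator loop (alternative decomposition, same cost).


-- ===== PORT A =====
-- A's loop over segments[1:] with state (cur_start, cur_end), flushing on a large gap.
def goA (gap : Int) (cs ce : Int) : List (Int × Int) → List (Int × Int)
  | [] => [(cs, ce)]
  | (s, e) :: rest =>
      if s - ce ≤ gap then goA gap cs e rest
      else (cs, ce) :: goA gap s e rest

def group_close_segments (segments : List (Int × Int)) (gap_thresh : Int) : List (Int × Int) :=
  match segments with
  | [] => []
  | (s, e) :: rest => goA gap_thresh s e rest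

-- ===== PORT B =====
-- one step of B's loop body: out inspected/updated at its last position (out[-1])
def altStep (gap : Int) (out : List (Int × Int)) (p : Int × Int) : List (Int × Int) :=
  match out.getLast? with
  | some (s1, e1) => if s1 - p.2 ≤ gap then out.dropLast ++ [(p.1, e1)] else out ++ [p]
  | none => [p]

def group_close_segments_alt (segments : List (Int × Int)) (gap_thresh : Int) : List (Int × Int) :=
  (segments.reverse.foldl (altStep gap_thresh) []).reverse

-- ===== PRECONDITION & SPEC =====
def Spec_group_close_segments (segments : List (Int × Int)) (gap_thresh : Int) (out : List (Int × Int)) : Prop := out = group_close_segments_alt segments gap_thresh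
instance (segments : List (Int × Int)) (gap_thresh : Int) (out : List (Int × Int)) : Decidable (Spec_group_close_segments segments gap_thresh out) := by unfold Spec_group_close_segments; infer_instance

-- ===== CLAIM (what is proved, stated in full; the proofs are below) =====
def Claim_equal_group_close_segments : Prop := ∀ (segments : List (Int × Int)) (gap_thresh : Int), Dom_group_close_segments segments gap_thresh → Spec_group_close_segments segments gap_thresh (group_close_segments segments gap_thresh)

-- ===== LEMMAS AND PROOFS =====

-- front-form of one B step: consing at the head of the reversed accumulator
def fStep (gap : Int) (p : Int × Int) (out : List (Int × Int)) : List (Int × Int) :=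
  match out with
  | (s1, e1) :: rest => if s1 - p.2 ≤ gap then (p.1, e1) :: rest else p :: out
  | [] => [p]

lemma altStep_rev (gap : Int) (out : List (Int × Int)) (p : Int × Int) :
    altStep gap out p = (fStep gap p out.reverse).reverse := by
  rcases h : out.reverse with _ | ⟨⟨s1, e1⟩, rest⟩
  · have : out = [] := by simpa using congrArg List.reverse h
    subst this; simp [altStep, fStep]
  · have hout : out = rest.reverse ++ [(s1, e1)] := by
      have := congrArg List.reverse h; simpa using this
    subst hout
    simp [altStep, fStep]
    split_ifs <;> simp

lemma foldl_alt_eq_foldr (gap : Int) (l : List (Int × Int)) :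
    (l.reverse.foldl (altStep gap) []).reverse = l.foldr (fStep gap) [] := by
  rw [List.foldl_reverse]
  induction l with
  | nil => simp
  | cons p rest ih =>
      simp only [List.foldr_cons]
      rw [altStep_rev, List.reverse_reverse, ih]

def setHd (c : Int) (l : List (Int × Int)) : List (Int × Int) :=
  match l with
  | (_, b) :: t => (c, b) :: t
  | [] => []

-- the start parameter only affects the head's first component
lemma goA_setHd (gap : Int) (rest : List (Int × Int)) :
    ∀ e c c', goA gap c e rest = setHd c (goA gap c' e rest) := by
  induction rest with
  | nil => intro e c c'; simp [goA, setHd]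
  | cons p rest ih =>
      intro e c c'
      obtain ⟨s, e'⟩ := p
      by_cases h : s - e ≤ gap
      · simp only [goA]; rw [if_pos h, if_pos h]; exact ih e' c c'
      · simp only [goA]; rw [if_neg h, if_neg h]; simp [setHd]

-- the head of goA starts at the given start
lemma goA_head (gap : Int) (rest : List (Int × Int)) :
    ∀ s e, ∃ E tl, goA gap s e rest = (s, E) :: tl := by
  induction rest with
  | nil => intro s e; exact ⟨e, [], rfl⟩
  | cons p rest ih =>
      intro s e
      obtain ⟨s2, e2⟩ := p
      by_cases h : s2 - e ≤ gap
      · have := ih s e2; simp only [goA]; rw [if_pos h]; exact this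
      · exact ⟨e, goA gap s2 e2 rest, by simp only [goA]; rw [if_neg h]⟩

lemma foldr_eq_goA (gap : Int) (rest : List (Int × Int)) :
    ∀ s e, ((s, e) :: rest).foldr (fStep gap) [] = goA gap s e rest := by
  induction rest with
  | nil => intro s e; simp [goA, fStep]
  | cons p rest ih =>
      intro s e
      obtain ⟨s2, e2⟩ := p
      obtain ⟨E, tl, hE⟩ := goA_head gap rest s2 e2
      have ihs : ((s2, e2) :: rest).foldr (fStep gap) [] = (s2, E) :: tl := by
        rw [ih s2 e2, hE]
      simp only [List.foldr_cons] at ihs ⊢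
      rw [ihs]
      by_cases h : s2 - e ≤ gap
      · have : goA gap s e2 rest = (s, E) :: tl := by
          rw [goA_setHd gap rest e2 s s2, hE]; rfl
        simp only [goA, fStep]
        rw [if_pos h, if_pos h, this]
      · simp only [goA, fStep]
        rw [if_neg h, if_neg h, hE]

-- ===== VERDICT (by name: the statement is the Claim_ definition above) =====
theorem group_close_segments_spec : Claim_equal_group_close_segments := by
  intro segments gap_thresh _
  unfold Spec_group_close_segments group_close_segments_alt
  rw [foldl_alt_eq_foldr]
  match segments with
  | [] => rfl
  | (s, e) :: rest =>
      simp only [group_close_segments]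
      exact (foldr_eq_goA gap_thresh rest s e).symm
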